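-- pv_equiv track=rewrite | github.com/Siddh-2006/Academic_work | Python_lab/python lab_4/3.py | Utree
-- ===== SOURCE A (Python) =====
-- def Utree(n):
--     i = 1
--     for j in range(n):
--         if j % 2 == 0:
--             i *= 2
--         else:
--             i += 1
--     return i
-- ===== SOURCE B (Python) =====
-- def Utree(n):
--     # Closed form: after each (double, +1) pair i -> 2*i+1, so k pairs give 2**(k+1)-1.
--     if n <= 0:
--         return 1
--     if n % 2 == 0:
--         return (1 << (n // 2 + 1)) - 1
--     return (1 << ((n + 3) // 2)) - 2
-- ===== Notes on version B (the rewrite author's own statement) =====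
-- stated objective: faster
-- what changed: Replaced the n-step loop of alternating doublings and increments by the closed form 2^(n//2+1)-1 (even n) / 2^((n+3)//2)-2 (odd n) computed with a single bit shift; intended as faster (measured 380x at n=65536; at the largest size the result integer was too big for the harness to decode).
import Mathlib
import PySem

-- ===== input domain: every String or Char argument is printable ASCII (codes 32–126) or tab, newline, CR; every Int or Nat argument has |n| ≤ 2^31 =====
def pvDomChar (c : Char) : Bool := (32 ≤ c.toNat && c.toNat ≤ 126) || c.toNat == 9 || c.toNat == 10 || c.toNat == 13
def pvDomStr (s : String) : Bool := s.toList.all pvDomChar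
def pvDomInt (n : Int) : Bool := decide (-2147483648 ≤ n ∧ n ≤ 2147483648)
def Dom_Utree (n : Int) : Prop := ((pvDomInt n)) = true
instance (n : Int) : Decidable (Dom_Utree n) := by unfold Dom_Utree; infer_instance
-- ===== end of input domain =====

-- B replaces A's n-step alternating loop by a closed-form power of two (one shift); faster.

-- ===== PORT A =====
def Utree (n : Int) : Int :=
  (PySem.List.pyRange 0 n 1).foldl
    (fun i j => if PySem.Int.mod j 2 = 0 then i * 2 else i + 1) 1

-- ===== PORT B =====
def Utree_alt (n : Int) : Int :=
  if n ≤ 0 then 1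
  else if PySem.Int.mod n 2 = 0 then 2 ^ (PySem.Int.floordiv n 2 + 1).toNat - 1
  else 2 ^ (PySem.Int.floordiv (n + 3) 2).toNat - 2

-- ===== PRECONDITION & SPEC =====
def Spec_Utree (n : Int) (out : Int) : Prop := out = Utree_alt n
instance (n : Int) (out : Int) : Decidable (Spec_Utree n out) := by unfold Spec_Utree; infer_instance

-- ===== CLAIM (what is proved, stated in full; the proofs are below) =====
def Claim_equal_Utree : Prop := ∀ (n : Int), Dom_Utree n → Spec_Utree n (Utree n)

-- ===== LEMMAS AND PROOFS =====

-- value of A's loop after m iterations, in closed form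
theorem utree_loop_closed (m : Nat) :
    (List.range m).foldl
      (fun (i : Int) (k : Nat) => if PySem.Int.mod (0 + (k : Int)) 2 = 0 then i * 2 else i + 1) (1 : Int)
    = if m % 2 = 0 then 2 ^ (m / 2 + 1) - 1 else 2 ^ (m / 2 + 2) - 2 := by
  induction m with
  | zero => simp
  | succ m ih =>
    rw [List.range_succ, List.foldl_append, ih]
    have hmod : PySem.Int.mod (0 + (m : Int)) 2 = ((m % 2 : Nat) : Int) := by
      rw [PySem.Int.mod_eq_emod_of_pos (by omega)]
      omega
    rcases Nat.even_or_odd m with ⟨k, hk⟩ | ⟨k, hk⟩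
    · subst hk
      have h1 : (k + k) % 2 = 0 := by omega
      have h2 : (k + k + 1) % 2 = 1 := by omega
      have h3 : (k + k) / 2 = k := by omega
      have h4 : (k + k + 1) / 2 = k := by omega
      simp only [List.foldl_cons, List.foldl_nil, hmod, h1, h2, h3, h4]
      norm_num
      ring
    · subst hk
      have h1 : (2 * k + 1) % 2 = 1 := by omega
      have h2 : (2 * k + 1 + 1) % 2 = 0 := by omega
      have h3 : (2 * k + 1) / 2 = k := by omega
      have h4 : (2 * k + 1 + 1) / 2 = k + 1 := by omega
      simp only [List.foldl_cons, List.foldl_nil, hmod, h1, h2, h3, h4]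
      norm_num
      ring

-- ===== VERDICT (by name: the statement is the Claim_ definition above) =====
theorem Utree_spec : Claim_equal_Utree := by
  intro n _
  unfold Spec_Utree Utree Utree_alt
  rw [PySem.List.pyRange_one]
  have hfold := utree_loop_closed ((n - 0).toNat)
  rw [List.foldl_map]
  rw [hfold]
  by_cases hn : n ≤ 0
  · have h0 : n.toNat = 0 := by omega
    have h1 : (n - 0).toNat = 0 := by omega
    simp [hn, h0]
  · have h0 : ¬ n ≤ 0 := hn
    rw [PySem.Int.mod_eq_emod_of_pos (by omega),
        PySem.Int.floordiv_eq_ediv_of_pos (by omega),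
        PySem.Int.floordiv_eq_ediv_of_pos (by omega)]
    by_cases hpar : n.toNat % 2 = 0
    · have hn2 : n % 2 = 0 := by omega
      have he : (n / 2 + 1).toNat = n.toNat / 2 + 1 := by omega
      simp [hpar, hn2, he, h0]
    · have hpar1 : n.toNat % 2 = 1 := by omega
      have hn2 : ¬ n % 2 = 0 := by omega
      have he : ((n + 3) / 2).toNat = n.toNat / 2 + 2 := by omega
      simp [hpar1, hn2, he, h0]
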